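-- pv_equiv track=rewrite | github.com/pypi-data/pypi-mirror-22 | packages/galgo/galgo-0.0.6.150.tar.gz/galgo-0.0.6.150/galgo/tools/imgt.py | get_exon_frames
-- ===== SOURCE A (Python) =====
-- def get_exon_frames(exon_seqs):
--     """
--     >>> get_exon_frames(['***GC*', 'GA****'])
--     [(0, 0), (0, 0)]
--     >>> get_exon_frames(['AT', 'GCTTTA', 'AT'])
--     [(0, 2), (2, 2), (2, 1)]
--     >>> get_exon_frames(['ATT'])
--     [(0, 0)]
--     """
--     frames = []
--     right = 0
--     for seq in exon_seqs:
--         left = right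
--         right = (left + len(seq)) % 3
--         frames.append((left, right))
--     return frames
-- ===== SOURCE B (Python) =====
-- def get_exon_frames(exon_seqs):
--     # Divide and conquer: frames of a half computed relative to start 0,
--     # then the right half's frames are shifted by the left half's ending frame.
--     def solve(seqs):
--         n = len(seqs)
--         if n == 0:
--             return []
--         if n == 1:
--             return [(0, len(seqs[0]) % 3)]
--         k = n // 2
--         left_frames = solve(seqs[:k])
--         right_frames = solve(seqs[k:])
--         f = left_frames[-1][1]
--         return left_frames + [((f + l) % 3, (f + r) % 3) for l, r in right_frames]
--     return solve(exon_seqs)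
-- ===== Notes on version B (the rewrite author's own statement) =====
-- stated objective: alternative
-- what changed: B replaces A's single left-to-right loop threading a running frame with a divide-and-conquer recursion: it splits the exon list in half, solves each half relative to start frame 0, and shifts the right half's frames by the left half's ending frame.
import Mathlib
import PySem

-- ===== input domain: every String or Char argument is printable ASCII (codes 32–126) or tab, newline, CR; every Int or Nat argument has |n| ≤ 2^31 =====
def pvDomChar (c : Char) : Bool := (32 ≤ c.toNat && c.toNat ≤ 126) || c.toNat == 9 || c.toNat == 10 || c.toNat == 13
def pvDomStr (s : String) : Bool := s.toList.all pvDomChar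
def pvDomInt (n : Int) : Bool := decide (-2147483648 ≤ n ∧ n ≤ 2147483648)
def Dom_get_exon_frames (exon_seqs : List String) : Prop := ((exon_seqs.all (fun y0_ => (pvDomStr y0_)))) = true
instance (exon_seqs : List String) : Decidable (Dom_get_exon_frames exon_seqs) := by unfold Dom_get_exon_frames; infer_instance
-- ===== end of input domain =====

-- B computes the frames by divide and conquer (solve each half relative to frame 0, shift the
-- right half by the left half's ending frame) instead of A's single loop with a running frame.


-- ===== PORT A =====
-- one loop threading the running frame 'right' through the state
def get_exon_frames (exon_seqs : List String) : List (Int × Int) :=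
  (exon_seqs.foldl
    (fun (st : List (Int × Int) × Int) seq =>
      let left := st.2
      let right := PySem.Int.mod (left + PySem.Str.len seq) 3
      (st.1 ++ [(left, right)], right))
    ([], 0)).1

-- ===== PORT B =====
-- divide and conquer: split in half, solve each half (relative to start frame 0),
-- shift the right half's frames by the left half's ending frame.
-- left_frames[-1][1] is ported as getLastD (0,0) |>.2: in this branch left_frames is nonempty,
-- so Python's [-1] indexing always succeeds there.
def altSolve : List String → List (Int × Int)
  | [] => []
  | [s] => [(0, PySem.Int.mod (PySem.Str.len s) 3)]
  | a :: b :: rest =>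
      let seqs := a :: b :: rest
      let k := seqs.length / 2
      let lf := altSolve (seqs.take k)
      let rf := altSolve (seqs.drop k)
      let f := (lf.getLastD (0, 0)).2
      lf ++ rf.map (fun p => (PySem.Int.mod (f + p.1) 3, PySem.Int.mod (f + p.2) 3))
termination_by xs => xs.length
decreasing_by
  · simp [List.length_take]; omega
  · simp [List.length_drop]; omega

def get_exon_frames_alt (exon_seqs : List String) : List (Int × Int) :=
  altSolve exon_seqs

-- ===== PRECONDITION & SPEC =====
def Spec_get_exon_frames (exon_seqs : List String) (out : List (Int × Int)) : Prop := out = get_exon_frames_alt exon_seqs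
instance (exon_seqs : List String) (out : List (Int × Int)) : Decidable (Spec_get_exon_frames exon_seqs out) := by unfold Spec_get_exon_frames; infer_instance

-- ===== CLAIM (what is proved, stated in full; the proofs are below) =====
def Claim_equal_get_exon_frames : Prop := ∀ (exon_seqs : List String), Dom_get_exon_frames exon_seqs → Spec_get_exon_frames exon_seqs (get_exon_frames exon_seqs)

-- ===== LEMMAS AND PROOFS =====

theorem mod3_mod (a : Int) : PySem.Int.mod a 3 = a % 3 :=
  PySem.Int.mod_eq_emod_of_pos (by norm_num)

theorem mod3_add_left (p n : Int) :
    PySem.Int.mod (PySem.Int.mod p 3 + n) 3 = PySem.Int.mod (p + n) 3 := by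
  simp only [mod3_mod]; omega

theorem mod3_add_right (f t : Int) :
    PySem.Int.mod (f + PySem.Int.mod t 3) 3 = PySem.Int.mod (f + t) 3 := by
  simp only [mod3_mod]; omega

-- the reference: frames of `seqs` when the text before them has length p
def framesFrom (p : Int) : List String → List (Int × Int)
  | [] => []
  | s :: rest =>
      (PySem.Int.mod p 3, PySem.Int.mod (p + PySem.Str.len s) 3) :: framesFrom (p + PySem.Str.len s) rest

theorem framesFrom_congr (xs : List String) (p q : Int)
    (h : PySem.Int.mod p 3 = PySem.Int.mod q 3) :
    framesFrom p xs = framesFrom q xs := by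
  induction xs generalizing p q with
  | nil => rfl
  | cons s rest ih =>
    have h2 : PySem.Int.mod (p + PySem.Str.len s) 3
        = PySem.Int.mod (q + PySem.Str.len s) 3 := by
      simp only [mod3_mod] at h ⊢; omega
    simp only [framesFrom, h, h2, ih _ _ h2]

theorem framesFrom_mod (xs : List String) (p : Int) :
    framesFrom (PySem.Int.mod p 3) xs = framesFrom p xs := by
  apply framesFrom_congr
  simp only [mod3_mod]; omega

theorem framesFrom_append (xs ys : List String) (p : Int) :
    framesFrom p (xs ++ ys)
      = framesFrom p xs ++ framesFrom (p + ((xs.map PySem.Str.len).sum)) ys := by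
  induction xs generalizing p with
  | nil => simp [framesFrom]
  | cons s rest ih => simp [framesFrom, ih, add_assoc]

theorem framesFrom_shift (ys : List String) (q f : Int) :
    (framesFrom q ys).map
        (fun p => (PySem.Int.mod (f + p.1) 3, PySem.Int.mod (f + p.2) 3))
      = framesFrom (f + q) ys := by
  induction ys generalizing q with
  | nil => rfl
  | cons s rest ih =>
    simp only [framesFrom, List.map_cons, mod3_add_right, ih, add_assoc]

theorem framesFrom_last (xs : List String) (p : Int) (d : Int × Int) (hx : xs ≠ []) :
    ((framesFrom p xs).getLastD d).2
      = PySem.Int.mod (p + (xs.map PySem.Str.len).sum) 3 := by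
  induction xs generalizing p d with
  | nil => exact absurd rfl hx
  | cons s rest ih =>
    rw [show framesFrom p (s :: rest)
        = (PySem.Int.mod p 3, PySem.Int.mod (p + PySem.Str.len s) 3)
            :: framesFrom (p + PySem.Str.len s) rest from rfl,
      List.getLastD_cons]
    cases rest with
    | nil => simp [framesFrom]
    | cons t ts =>
      rw [ih (p + PySem.Str.len s) _ (by simp)]
      simp [add_assoc]

-- A-side loop invariant
theorem loopA (seqs : List String) (p : Int) (acc : List (Int × Int)) :
    (seqs.foldl
      (fun (st : List (Int × Int) × Int) seq =>
        let left := st.2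
        let right := PySem.Int.mod (left + PySem.Str.len seq) 3
        (st.1 ++ [(left, right)], right))
      (acc, PySem.Int.mod p 3)).1
    = acc ++ framesFrom p seqs := by
  induction seqs generalizing p acc with
  | nil => simp [framesFrom]
  | cons s rest ih =>
    simp only [List.foldl_cons, mod3_add_left]
    rw [ih (p + PySem.Str.len s)]
    simp [framesFrom]

-- B-side correctness
theorem altSolve_eq (xs : List String) : altSolve xs = framesFrom 0 xs := by
  induction xs using altSolve.induct with
  | case1 => rw [altSolve]; rfl
  | case2 s => rw [altSolve]; simp [framesFrom]
  | case3 a b rest seqs k ih1 ih2 =>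
    simp only [seqs, k] at ih1 ih2
    rw [altSolve]
    simp only [ih1, ih2]
    have htake : ((a :: b :: rest).take ((a :: b :: rest).length / 2)) ≠ [] := by
      apply List.ne_nil_of_length_pos
      simp [List.length_take]
    rw [framesFrom_last _ _ _ htake, zero_add, framesFrom_shift, add_zero, framesFrom_mod]
    have h := framesFrom_append
      (List.take ((a :: b :: rest).length / 2) (a :: b :: rest))
      (List.drop ((a :: b :: rest).length / 2) (a :: b :: rest)) 0
    rw [List.take_append_drop, zero_add] at h
    exact h.symm

-- ===== VERDICT (by name: the statement is the Claim_ definition above) =====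
theorem get_exon_frames_spec : Claim_equal_get_exon_frames := by
  intro exon_seqs _
  show get_exon_frames exon_seqs = get_exon_frames_alt exon_seqs
  have h := loopA exon_seqs 0 []
  simpa [get_exon_frames, get_exon_frames_alt, altSolve_eq,
    show PySem.Int.mod 0 3 = 0 by decide] using h
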